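-- pv_equiv track=rewrite | github.com/Mehdi4743/Package_ipclassifier | ipclassifier/classifier.py | get_ip_class
-- ===== SOURCE A (Python) =====
-- def get_ip_class(ip: str) -> str:
--
--     try:
--         # Valider l'adresse IP et extraire le premier octet
--         octets = ip.split(".")
--         if len(octets) != 4 or not all(o.isdigit() for o in octets):
--             return "Invalid IP"
--
--         first_octet = int(octets[0])
--         if first_octet < 0 or first_octet > 255:
--             return "Invalid IP"
--
--         # Identifier la classe de l'IP
--         if 1 <= first_octet <= 126:
--             return "Class A"
--         elif 128 <= first_octet <= 191:
--             return "Class B"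
--         elif 192 <= first_octet <= 223:
--             return "Class C"
--         elif 224 <= first_octet <= 239:
--             return "Class D (Multicast)"
--         elif 240 <= first_octet <= 255:
--             return "Class E (Experimental)"
--         else:
--             return "Invalid IP"
--     except Exception as e:
--         return f"Error: {e}"
-- ===== SOURCE B (Python) =====
-- def _first_octet(ip):
--     """First octet of a well-formed dotted-quad (4 all-digit parts, value <= 255), else None."""
--     parts = ip.split(".")
--     if len(parts) != 4 or not all(p.isdigit() for p in parts):
--         return None
--     n = int(parts[0])
--     return n if n <= 255 else None
--
--
-- def get_ip_class(ip: str) -> str: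
--     n = _first_octet(ip)
--     if n is None:
--         return "Invalid IP"
--     if n < 128:
--         # top bit 0 => Class A, except the reserved values 0 and 127
--         return "Class A" if 0 < n < 127 else "Invalid IP"
--     # count the run of leading one-bits of the 8-bit octet: 1->B, 2->C, 3->D, >=4->E
--     ones, v = 0, n
--     for _ in range(8):
--         if v < 128:
--             break
--         ones += 1
--         v = (v - 128) * 2
--     return ("Class B", "Class C", "Class D (Multicast)",
--             "Class E (Experimental)")[min(ones, 4) - 1]
-- ===== Notes on version B (the rewrite author's own statement) =====
-- stated objective: alternative
-- what changed: B is decomposed into a parse helper returning an optional first octet, and classifies by counting the run of leading one-bits of the 8-bit octet (the bit-pattern definition of IP classes: 1 leading one -> B, 2 -> C, 3 -> D, >=4 -> E; top bit 0 -> A except the reserved 0 and 127) instead of A's if/elif range cascade.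
import Mathlib
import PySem

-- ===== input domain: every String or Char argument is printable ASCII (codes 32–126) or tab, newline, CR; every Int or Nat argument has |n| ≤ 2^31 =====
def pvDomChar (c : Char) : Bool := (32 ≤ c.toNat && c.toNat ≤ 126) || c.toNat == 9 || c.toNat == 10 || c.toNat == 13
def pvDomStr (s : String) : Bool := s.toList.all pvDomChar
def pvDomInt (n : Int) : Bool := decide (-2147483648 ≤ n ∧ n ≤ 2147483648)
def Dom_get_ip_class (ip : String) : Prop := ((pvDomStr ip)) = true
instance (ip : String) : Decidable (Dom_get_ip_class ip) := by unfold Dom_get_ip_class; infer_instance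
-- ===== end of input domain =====

-- B splits the work into a parse helper returning an optional first octet and then
-- classifies by counting the run of leading one-bits of the octet instead of A's
-- range cascade (alternative algorithm, same cost); same value on every input.
-- ===== PORT A =====
-- A's try/except cannot fire: on four isdigit strings int() succeeds, so the except branch is unreachable and is not ported.
def get_ip_class (ip : String) : String :=
  let octets := (PySem.Str.split? ip ".").getD []
  if ¬(octets.length = 4 ∧ octets.all PySem.Str.strIsdigit) then "Invalid IP"
  else
    let first_octet := (PySem.Int.ofStr? ((PySem.List.pyGet? octets 0).getD "")).getD 0
    if first_octet < 0 ∨ first_octet > 255 then "Invalid IP"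
    else if 1 ≤ first_octet ∧ first_octet ≤ 126 then "Class A"
    else if 128 ≤ first_octet ∧ first_octet ≤ 191 then "Class B"
    else if 192 ≤ first_octet ∧ first_octet ≤ 223 then "Class C"
    else if 224 ≤ first_octet ∧ first_octet ≤ 239 then "Class D (Multicast)"
    else if 240 ≤ first_octet ∧ first_octet ≤ 255 then "Class E (Experimental)"
    else "Invalid IP"

-- ===== PORT B =====
def pvFirstOctet (ip : String) : Option Int :=
  let parts := (PySem.Str.split? ip ".").getD []
  if parts.length ≠ 4 ∨ ¬ parts.all PySem.Str.strIsdigit then none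
  else
    let n := (PySem.Int.ofStr? ((PySem.List.pyGet? parts 0).getD "")).getD 0
    if n ≤ 255 then some n else none

-- the 'for _ in range(8): if v < 128: break; ones += 1; v = (v-128)*2' loop
def pvOnesLoop : Nat → Int → Int → Int × Int
  | 0, ones, v => (ones, v)
  | k + 1, ones, v => if v < 128 then (ones, v) else pvOnesLoop k (ones + 1) ((v - 128) * 2)

def get_ip_class_alt (ip : String) : String :=
  match pvFirstOctet ip with
  | none => "Invalid IP"
  | some n =>
    if n < 128 then (if 0 < n ∧ n < 127 then "Class A" else "Invalid IP")
    else
      let ones := (pvOnesLoop 8 0 n).1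
      (PySem.List.pyGet? ["Class B", "Class C", "Class D (Multicast)", "Class E (Experimental)"]
        (min ones 4 - 1)).getD ""

-- ===== PRECONDITION & SPEC =====
def Spec_get_ip_class (ip : String) (out : String) : Prop := out = get_ip_class_alt ip
instance (ip : String) (out : String) : Decidable (Spec_get_ip_class ip out) := by unfold Spec_get_ip_class; infer_instance

-- ===== CLAIM (what is proved, stated in full; the proofs are below) =====
def Claim_equal_get_ip_class : Prop := ∀ (ip : String), Dom_get_ip_class ip → Spec_get_ip_class ip (get_ip_class ip)

-- ===== LEMMAS AND PROOFS =====
-- the two classification cores agree on every octet value 0..255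
theorem pv_core_eq (n : Int) (h0 : 0 ≤ n) (h1 : n ≤ 255) :
    (if n < 0 ∨ n > 255 then "Invalid IP"
     else if 1 ≤ n ∧ n ≤ 126 then "Class A"
     else if 128 ≤ n ∧ n ≤ 191 then "Class B"
     else if 192 ≤ n ∧ n ≤ 223 then "Class C"
     else if 224 ≤ n ∧ n ≤ 239 then "Class D (Multicast)"
     else if 240 ≤ n ∧ n ≤ 255 then "Class E (Experimental)"
     else "Invalid IP") =
    (if n < 128 then (if 0 < n ∧ n < 127 then "Class A" else "Invalid IP")
     else (PySem.List.pyGet? ["Class B", "Class C", "Class D (Multicast)", "Class E (Experimental)"]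
        (min (pvOnesLoop 8 0 n).1 4 - 1)).getD "") := by
  interval_cases n <;> rfl

-- ===== VERDICT (by name: the statement is the Claim_ definition above) =====
theorem get_ip_class_spec : Claim_equal_get_ip_class := by
  intro ip _
  unfold Spec_get_ip_class get_ip_class get_ip_class_alt pvFirstOctet
  by_cases hg : ((PySem.Str.split? ip ".").getD []).length = 4 ∧
      ((PySem.Str.split? ip ".").getD []).all PySem.Str.strIsdigit
  · simp only [hg.1, hg.2, ne_eq, not_true_eq_false, false_or, if_false, and_self]
    set n := (PySem.Int.ofStr? ((PySem.List.pyGet? ((PySem.Str.split? ip ".").getD []) 0).getD "")).getD 0 with hn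
    by_cases hle : n ≤ 255
    · rw [if_pos hle]
      by_cases hneg : n < 0
      · rw [if_pos (Or.inl hneg)]
        simp only [if_pos (by omega : n < 128)]
        rw [if_neg (by omega)]
      · exact pv_core_eq n (by omega) hle
    · rw [if_neg hle, if_pos (Or.inr (by omega))]
  · have hb : ((PySem.Str.split? ip ".").getD []).length ≠ 4 ∨
        ¬ ((PySem.Str.split? ip ".").getD []).all PySem.Str.strIsdigit = true := by tauto
    rw [if_pos hg, if_pos hb]
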